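-- pv_equiv track=rewrite | github.com/mathspp/mathspp | pages/02.blog/counting-passwords-with-automatons/automatons.py | generate_state_transitions
-- ===== SOURCE A (Python) =====
-- def generate_next_pwd_states(s):
--     return [s[:i] + (num + 1,) + s[i + 1 :] for i, num in enumerate(s)]
--
-- def generate_state_transitions(classes, max_length):
--     queue = [(0,) * len(classes)]
--     state_transitions = {}
--
--     while queue:
--         state, *queue = queue
--         if sum(state) < max_length:
--             next_states = generate_next_pwd_states(state)
--         else:
--             next_states = []
--         state_transitions[state] = list(zip(classes, next_states))
--         for state_ in next_states:
--             if state_ not in queue: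
--                 queue.append(state_)
--
--     return state_transitions
-- ===== SOURCE B (Python) =====
-- def compositions(total, parts):
--     """All tuples of `parts` non-negative ints summing to `total`, in
--     lexicographically decreasing order."""
--     if parts == 0:
--         return [()] if total == 0 else []
--     return [(head,) + rest
--             for head in range(total, -1, -1)
--             for rest in compositions(total - head, parts - 1)]
--
-- def generate_state_transitions(classes, max_length):
--     # Enumerate the state space combinatorially instead of exploring it with
--     # a BFS queue: the states are exactly the compositions of 0..max_length
--     # into len(classes) parts, level by level, each level in lex-decreasing order.
--     n = len(classes)
--     top = max(max_length, 0) if n > 0 else 0  # without classes only the empty state exists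
--     state_transitions = {}
--     for k in range(top + 1):
--         for s in compositions(k, n):
--             if k < max_length:
--                 nxt = [s[:i] + (s[i] + 1,) + s[i + 1:] for i in range(n)]
--             else:
--                 nxt = []
--             state_transitions[s] = list(zip(classes, nxt))
--     return state_transitions
-- ===== Notes on version B (the rewrite author's own statement) =====
-- stated objective: alternative
-- what changed: Replaced the BFS queue/visited-style graph expansion by a direct combinatorial enumeration of the state space: states are generated level by level as the compositions of 0..max_length into len(classes) parts in lexicographically decreasing order, so the queue, the linear 'not in queue' scans and the successor-driven discovery disappear.
import Mathlib
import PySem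

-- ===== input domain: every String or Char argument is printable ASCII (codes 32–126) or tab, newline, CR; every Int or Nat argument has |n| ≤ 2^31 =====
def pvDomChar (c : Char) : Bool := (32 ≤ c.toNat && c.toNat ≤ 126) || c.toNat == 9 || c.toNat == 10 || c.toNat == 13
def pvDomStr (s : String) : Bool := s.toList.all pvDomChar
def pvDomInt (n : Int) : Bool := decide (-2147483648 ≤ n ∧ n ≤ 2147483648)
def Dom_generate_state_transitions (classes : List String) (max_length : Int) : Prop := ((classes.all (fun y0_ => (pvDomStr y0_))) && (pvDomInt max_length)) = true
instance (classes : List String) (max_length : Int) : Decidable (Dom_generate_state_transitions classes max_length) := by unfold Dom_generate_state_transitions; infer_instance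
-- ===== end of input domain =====

-- B replaces A's BFS queue expansion of the state graph by a direct combinatorial
-- enumeration of the states (compositions of 0..max_length, level by level, each level
-- in lexicographically decreasing order); same return value, no queue and no membership scans.

-- ===== PORT A =====

-- port of generate_next_pwd_states: [s[:i] + (num + 1,) + s[i + 1:] for i, num in enumerate(s)]
def generate_next_pwd_states (s : List Int) : List (List Int) :=
  (PySem.List.enumerate s).map (fun p =>
    PySem.List.slice s none (some p.1) ++ [p.2 + 1] ++ PySem.List.slice s (some (p.1 + 1)) none)

-- canonical form of the successor list (cited by pvLoop's termination argument below)
def pvIncs : List Int → List (List Int)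
  | [] => []
  | a :: t => ((a + 1) :: t) :: (pvIncs t).map (a :: ·)

lemma pvIncs_length (s : List Int) : (pvIncs s).length = s.length := by
  induction s with
  | nil => rfl
  | cons a t ih => simp [pvIncs, ih]

lemma mem_pvIncs_length_sum {s t : List Int} (h : t ∈ pvIncs s) :
    t.length = s.length ∧ t.sum = s.sum + 1 := by
  induction s generalizing t with
  | nil => simp [pvIncs] at h
  | cons a u ih =>
    simp only [pvIncs, List.mem_cons, List.mem_map] at h
    rcases h with rfl | ⟨c, hc, rfl⟩
    · constructor <;> simp <;> ring
    · obtain ⟨h1, h2⟩ := ih hc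
      constructor <;> simp [h1, h2] <;> ring

lemma gnps_general (s pre : List Int) :
    (PySem.List.enumerate s (pre.length : Int)).map (fun p =>
      PySem.List.slice (pre ++ s) none (some p.1) ++ [p.2 + 1] ++
        PySem.List.slice (pre ++ s) (some (p.1 + 1)) none)
    = (pvIncs s).map (pre ++ ·) := by
  induction s generalizing pre with
  | nil => simp [PySem.List.enumerate_nil, pvIncs]
  | cons a t ih =>
    rw [PySem.List.enumerate_cons, List.map_cons]
    have h1 : PySem.List.slice (pre ++ a :: t) none (some (pre.length : Int)) = pre := by
      rw [PySem.List.slice_to_natCast]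
      exact List.take_left
    have h2 : PySem.List.slice (pre ++ a :: t) (some ((pre.length : Int) + 1)) none = t := by
      have : ((pre.length : Int) + 1) = ((pre.length + 1 : Nat) : Int) := by push_cast; ring
      rw [this, PySem.List.slice_from_natCast]
      have : pre ++ a :: t = (pre ++ [a]) ++ t := by simp
      rw [this]
      have : pre.length + 1 = (pre ++ [a]).length := by simp
      rw [this, List.drop_left]
    have h3 : PySem.List.enumerate t ((pre.length : Int) + 1)
        = PySem.List.enumerate t (((pre ++ [a]).length : Nat) : Int) := by
      congr 1
      simp
    have h4 := ih (pre ++ [a])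
    rw [h1, h2, h3]
    have h5 : (pre ++ [a]) ++ t = pre ++ a :: t := by simp
    rw [h5] at h4
    rw [h4]
    simp [pvIncs, List.map_map, Function.comp_def]

lemma gnps_eq_pvIncs (s : List Int) : generate_next_pwd_states s = pvIncs s := by
  have h := gnps_general s []
  simpa [generate_next_pwd_states] using h

def pvWeight (L : Int) (s : List Int) : Nat := (s.length + 1) ^ (L - s.sum).toNat

def pvMeasure (L : Int) (q : List (List Int)) : Nat := (q.map (pvWeight L)).sum

lemma pvMeasure_foldl_le (L : Int) (l q : List (List Int)) :
    pvMeasure L (l.foldl (fun qq s_ => if s_ ∈ qq then qq else qq ++ [s_]) q)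
      ≤ pvMeasure L q + (l.map (pvWeight L)).sum := by
  induction l generalizing q with
  | nil => simp [pvMeasure]
  | cons x l ih =>
    simp only [List.foldl_cons, List.map_cons, List.sum_cons]
    by_cases hx : x ∈ q
    · simp only [if_pos hx]
      calc _ ≤ pvMeasure L q + (l.map (pvWeight L)).sum := ih q
        _ ≤ _ := by omega
    · simp only [if_neg hx]
      calc _ ≤ pvMeasure L (q ++ [x]) + (l.map (pvWeight L)).sum := ih _
        _ = _ := by simp [pvMeasure]; omega

lemma pvStep_decreasing (L : Int) (state : List Int) (rest : List (List Int)) :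
    pvMeasure L
      ((if state.sum < L then generate_next_pwd_states state else []).foldl
        (fun qq s_ => if s_ ∈ qq then qq else qq ++ [s_]) rest)
      < pvMeasure L (state :: rest) := by
  have hwpos : 0 < pvWeight L state := Nat.pow_pos (by omega)
  by_cases hs : state.sum < L
  · rw [if_pos hs, gnps_eq_pvIncs]
    refine lt_of_le_of_lt (pvMeasure_foldl_le L _ rest) ?_
    have hv : 0 < (L - state.sum).toNat := by omega
    have hconst : ∀ t ∈ pvIncs state,
        pvWeight L t = (state.length + 1) ^ ((L - state.sum).toNat - 1) := by
      intro t ht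
      obtain ⟨h1, h2⟩ := mem_pvIncs_length_sum ht
      have : (L - t.sum).toNat = (L - state.sum).toNat - 1 := by omega
      simp [pvWeight, h1, this]
    have hsum : ((pvIncs state).map (pvWeight L)).sum
        = state.length * (state.length + 1) ^ ((L - state.sum).toNat - 1) := by
      rw [List.map_congr_left hconst]
      simp [List.map_const', pvIncs_length, Nat.mul_comm]
    have hlt : state.length * (state.length + 1) ^ ((L - state.sum).toNat - 1)
        < pvWeight L state := by
      unfold pvWeight
      calc state.length * (state.length + 1) ^ ((L - state.sum).toNat - 1)
          < (state.length + 1) * (state.length + 1) ^ ((L - state.sum).toNat - 1) := by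
            exact (Nat.mul_lt_mul_right (Nat.pow_pos (by omega))).mpr (by omega)
        _ = (state.length + 1) ^ ((L - state.sum).toNat - 1 + 1) := by ring
        _ = _ := by congr 1; omega
    have : pvMeasure L (state :: rest) = pvWeight L state + pvMeasure L rest := by
      simp [pvMeasure]
    omega
  · rw [if_neg hs]
    simp only [List.foldl_nil]
    have : pvMeasure L (state :: rest) = pvWeight L state + pvMeasure L rest := by
      simp [pvMeasure]
    omega

-- the while loop of generate_state_transitions (FIFO queue, dict of transitions)
def pvLoop (classes : List String) (L : Int) (q : List (List Int))
    (st : PySem.Dict (List Int) (List (String × List Int))) :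
    PySem.Dict (List Int) (List (String × List Int)) :=
  match q with
  | [] => st
  | state :: rest =>
    let next_states := if state.sum < L then generate_next_pwd_states state else []
    pvLoop classes L
      (next_states.foldl (fun qq s_ => if s_ ∈ qq then qq else qq ++ [s_]) rest)
      (st.insert state (classes.zip next_states))
termination_by pvMeasure L q
decreasing_by exact pvStep_decreasing L state rest

def generate_state_transitions (classes : List String) (max_length : Int) :
    List (List Int × List (String × List Int)) :=
  (pvLoop classes max_length [List.replicate classes.length 0] PySem.Dict.empty).items

-- ===== PORT B =====

-- port of compositions(total, parts): all tuples of `parts` non-negative ints summing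
-- to `total`, lexicographically decreasing
def pvCompositions (total : Int) (parts : Nat) : List (List Int) :=
  match parts with
  | 0 => if total = 0 then [[]] else []
  | p + 1 => (PySem.List.pyRange total (-1) (-1)).flatMap
      (fun head => (pvCompositions (total - head) p).map (head :: ·))

def generate_state_transitions_alt (classes : List String) (max_length : Int) :
    List (List Int × List (String × List Int)) :=
  let n := classes.length
  let top : Int := if 0 < n then max max_length 0 else 0
  ((PySem.List.pyRange 0 (top + 1) 1).foldl (fun st k =>
      (pvCompositions k n).foldl (fun st s =>
        st.insert s (classes.zip
          (if k < max_length then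
            -- s[:i] + (s[i] + 1,) + s[i+1:] for i in range(n); s[i] is in range, pyGetD is exact
            (PySem.List.pyRange 0 (n : Int) 1).map (fun i =>
              PySem.List.slice s none (some i) ++ [PySem.List.pyGetD s i 0 + 1] ++
                PySem.List.slice s (some (i + 1)) none)
          else []))) st)
    PySem.Dict.empty).items

-- ===== PRECONDITION & SPEC =====
def Spec_generate_state_transitions (classes : List String) (max_length : Int) (out : List (List Int × List (String × List Int))) : Prop := out = generate_state_transitions_alt classes max_length
instance (classes : List String) (max_length : Int) (out : List (List Int × List (String × List Int))) : Decidable (Spec_generate_state_transitions classes max_length out) := by unfold Spec_generate_state_transitions; infer_instance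

-- ===== CLAIM (what is proved, stated in full; the proofs are below) =====
def Claim_equal_generate_state_transitions : Prop := ∀ (classes : List String) (max_length : Int), Dom_generate_state_transitions classes max_length → Spec_generate_state_transitions classes max_length (generate_state_transitions classes max_length)

-- ===== LEMMAS AND PROOFS =====

-- first-discovery children of a state: increment position i only when everything after i is zero
def pvNewKids : List Int → List (List Int)
  | [] => []
  | a :: t => (if t.all (· == 0) then [(a + 1) :: t] else []) ++ (pvNewKids t).map (a :: ·)

lemma mem_pvCompositions {s : List Int} {k : Int} {n : Nat} :
    s ∈ pvCompositions k n ↔ s.length = n ∧ s.sum = k ∧ ∀ x ∈ s, 0 ≤ x := by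
  induction n generalizing k s with
  | zero =>
    simp only [pvCompositions]
    split
    · rename_i hk
      subst hk
      simp only [List.mem_singleton]
      constructor
      · rintro rfl; simp
      · rintro ⟨h1, -, -⟩; exact List.length_eq_zero_iff.mp h1
    · rename_i hk
      simp only [List.not_mem_nil, false_iff, not_and]
      intro h1 h2
      exact absurd (by rw [List.length_eq_zero_iff.mp h1] at h2; simpa using h2.symm) hk
  | succ p ih =>
    simp only [pvCompositions, List.mem_flatMap, List.mem_map]
    constructor
    · rintro ⟨a, ha, t, ht, rfl⟩
      obtain ⟨ha1, ha2⟩ := (PySem.List.mem_pyRange_neg_one).mp ha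
      obtain ⟨h1, h2, h3⟩ := ih.mp ht
      refine ⟨by simp [h1], by simp [h2], ?_⟩
      intro x hx
      rcases List.mem_cons.mp hx with rfl | hx
      · omega
      · exact h3 x hx
    · rintro ⟨h1, h2, h3⟩
      match s, h1 with
      | a :: t, h1 =>
        have hsum : a + t.sum = k := by simpa using h2
        have htn : 0 ≤ t.sum := List.sum_nonneg (fun x hx => h3 x (List.mem_cons_of_mem a hx))
        have ha : 0 ≤ a := h3 a List.mem_cons_self
        refine ⟨a, PySem.List.mem_pyRange_neg_one.mpr ⟨by omega, by omega⟩, t,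
          ih.mpr ⟨by simpa using h1, by omega, fun x hx => h3 x (List.mem_cons_of_mem a hx)⟩, rfl⟩

lemma pvCompositions_zero (n : Nat) : pvCompositions 0 n = [List.replicate n 0] := by
  induction n with
  | zero => simp [pvCompositions]
  | succ p ih =>
    rw [pvCompositions, PySem.List.pyRange_neg_one_cons (by omega),
      PySem.List.pyRange_neg_one_eq_nil (by omega)]
    simp [ih, List.replicate_succ]

lemma pvCompositions_sorted (k : Int) (n : Nat) :
    (pvCompositions k n).Pairwise (fun a b => b < a) := by
  induction n generalizing k with
  | zero => rw [pvCompositions]; split <;> simp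
  | succ p ih =>
    rw [pvCompositions, List.pairwise_flatMap]
    constructor
    · intro a _
      rw [List.pairwise_map]
      exact (ih (k - a)).imp (fun h => List.Lex.cons h)
    · have hp : (PySem.List.pyRange k (-1) (-1)).Pairwise (fun a b => b < a) := by
        rw [PySem.List.pyRange_neg_one_eq_reverse, List.pairwise_reverse]
        exact PySem.List.pairwise_lt_pyRange_one _ _
      refine hp.imp ?_
      rintro a b hba x hx y hy
      obtain ⟨t, -, rfl⟩ := List.mem_map.mp hx
      obtain ⟨t', -, rfl⟩ := List.mem_map.mp hy
      exact List.Lex.rel hba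

lemma pvCompositions_nodup (k : Int) (n : Nat) : (pvCompositions k n).Nodup := by
  have h := pvCompositions_sorted k n
  refine h.imp ?_
  intro a b hba heq
  subst heq
  exact lt_irrefl a hba

lemma pvNewKids_sublist (s : List Int) : (pvNewKids s).Sublist (pvIncs s) := by
  induction s with
  | nil => simp [pvNewKids, pvIncs]
  | cons a t ih =>
    rw [pvNewKids, pvIncs]
    by_cases h : t.all (· == 0)
    · rw [if_pos h]
      exact (ih.map _).cons₂ _
    · rw [if_neg h]
      exact (ih.map _).cons _

lemma pvSelf_mem_newKids {t : List Int} (h0 : ∀ x ∈ t, 0 ≤ x) (hnz : ¬ t.all (· == 0)) :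
    ∃ t', t'.length = t.length ∧ t'.sum = t.sum - 1 ∧ (∀ x ∈ t', 0 ≤ x) ∧ t ∈ pvNewKids t' := by
  induction t with
  | nil => simp at hnz
  | cons b u ih =>
    by_cases hu : u.all (· == 0)
    · have hb : b ≠ 0 := by
        intro h
        apply hnz
        simp [List.all_cons, h, hu]
      have hb0 : 0 ≤ b := h0 b List.mem_cons_self
      refine ⟨(b - 1) :: u, by simp, by simp only [List.sum_cons]; omega, ?_, ?_⟩
      · intro x hx
        rcases List.mem_cons.mp hx with rfl | hx
        · omega
        · exact h0 x (List.mem_cons_of_mem b hx)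
      · rw [pvNewKids, if_pos hu]
        have : b - 1 + 1 = b := by ring
        simp [this]
    · obtain ⟨u', h1, h2, h3, h4⟩ := ih (fun x hx => h0 x (List.mem_cons_of_mem b hx)) hu
      refine ⟨b :: u', by simp [h1], by simp only [List.sum_cons, h2]; omega, ?_, ?_⟩
      · intro x hx
        rcases List.mem_cons.mp hx with rfl | hx
        · exact h0 x List.mem_cons_self
        · exact h3 x hx
      · rw [pvNewKids]
        exact List.mem_append_right _ (List.mem_map.mpr ⟨u, h4, rfl⟩)

lemma pvGT {p c : List Int} (h0 : ∀ x ∈ p, 0 ≤ x) (hc : c ∈ pvIncs p) (hnk : c ∉ pvNewKids p) :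
    ∃ q, p < q ∧ q.length = p.length ∧ q.sum = p.sum ∧ (∀ x ∈ q, 0 ≤ x) ∧ c ∈ pvNewKids q := by
  induction p generalizing c with
  | nil => simp [pvIncs] at hc
  | cons a t ih =>
    have h0t : ∀ x ∈ t, 0 ≤ x := fun x hx => h0 x (List.mem_cons_of_mem a hx)
    simp only [pvIncs, List.mem_cons, List.mem_map] at hc
    rcases hc with rfl | ⟨c', hc', rfl⟩
    · have hnz : ¬ t.all (· == 0) := by
        intro h
        exact hnk (by rw [pvNewKids, if_pos h]; exact List.mem_append_left _ List.mem_cons_self)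
      obtain ⟨t', h1, h2, h3, h4⟩ := pvSelf_mem_newKids h0t hnz
      refine ⟨(a + 1) :: t', List.Lex.rel (by omega), by simp [h1], by simp only [List.sum_cons, h2]; omega, ?_, ?_⟩
      · intro x hx
        rcases List.mem_cons.mp hx with rfl | hx
        · have := h0 a List.mem_cons_self; omega
        · exact h3 x hx
      · rw [pvNewKids]
        exact List.mem_append_right _ (List.mem_map.mpr ⟨t, h4, rfl⟩)
    · have hc'nk : c' ∉ pvNewKids t := by
        intro h
        exact hnk (by rw [pvNewKids]; exact List.mem_append_right _ (List.mem_map.mpr ⟨c', h, rfl⟩))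
      obtain ⟨q', hq1, hq2, hq3, hq4, hq5⟩ := ih h0t hc' hc'nk
      refine ⟨a :: q', List.Lex.cons hq1, by simp [hq2], by simp only [List.sum_cons, hq3], ?_, ?_⟩
      · intro x hx
        rcases List.mem_cons.mp hx with rfl | hx
        · exact h0 x List.mem_cons_self
        · exact hq4 x hx
      · rw [pvNewKids]
        exact List.mem_append_right _ (List.mem_map.mpr ⟨c', hq5, rfl⟩)

lemma pvFlatMap_newKids (k : Int) (n : Nat) (hk : 0 ≤ k) :
    (pvCompositions k n).flatMap pvNewKids = pvCompositions (k + 1) n := by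
  induction n generalizing k with
  | zero =>
    by_cases h : k = 0
    · subst h; simp [pvCompositions, pvNewKids]
    · rw [pvCompositions, if_neg h, pvCompositions, if_neg (by omega)]
      simp
  | succ p ih =>
    have hrep : pvNewKids (List.replicate p 0) = pvCompositions 1 p := by
      have h := ih 0 le_rfl
      rw [pvCompositions_zero] at h
      simpa using h
    rw [pvCompositions, List.flatMap_assoc,
      PySem.List.pyRange_neg_one_cons (show (-1 : Int) < k by omega), List.flatMap_cons]
    have hgroup0 : (List.map (fun x => k :: x) (pvCompositions (k - k) p)).flatMap pvNewKids
        = ((k + 1) :: List.replicate p 0) :: List.map (fun x => k :: x) (pvCompositions 1 p) := by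
      rw [show k - k = 0 by omega, pvCompositions_zero]
      simp only [List.map_cons, List.map_nil, List.flatMap_cons, List.flatMap_nil, List.append_nil]
      rw [pvNewKids, if_pos (by simp), hrep]
      simp
    have hrest : (PySem.List.pyRange (k - 1) (-1) (-1)).flatMap
          (fun a => (List.map (fun x => a :: x) (pvCompositions (k - a) p)).flatMap pvNewKids)
        = (PySem.List.pyRange (k - 1) (-1) (-1)).flatMap
          (fun a => List.map (fun x => a :: x) (pvCompositions (k + 1 - a) p)) := by
      refine List.flatMap_congr ?_
      intro a ha
      obtain ⟨ha1, ha2⟩ := PySem.List.mem_pyRange_neg_one.mp ha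
      rw [List.flatMap_map]
      have hinner : (pvCompositions (k - a) p).flatMap (fun t => pvNewKids (a :: t))
          = (pvCompositions (k - a) p).flatMap (fun t => List.map (fun x => a :: x) (pvNewKids t)) := by
        refine List.flatMap_congr ?_
        intro t ht
        obtain ⟨-, hsum, hpos⟩ := mem_pvCompositions.mp ht
        have hnall : ¬ t.all (· == 0) := by
          intro hall
          have : t.sum = 0 := List.sum_eq_zero (by simpa using hall)
          omega
        simp only [pvNewKids, if_neg hnall, List.nil_append]
      rw [hinner, ← List.map_flatMap, ih (k - a) (by omega)]
      congr 2
      omega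
    rw [hgroup0, hrest]
    conv_rhs =>
      rw [pvCompositions, PySem.List.pyRange_neg_one_cons (show (-1 : Int) < k + 1 by omega),
        show k + 1 - 1 = k by omega,
        PySem.List.pyRange_neg_one_cons (show (-1 : Int) < k by omega),
        List.flatMap_cons, List.flatMap_cons,
        show k + 1 - (k + 1) = 0 by omega, show k + 1 - k = 1 by omega, pvCompositions_zero]
    simp

lemma pvIncs_nodup (s : List Int) : (pvIncs s).Nodup := by
  induction s with
  | nil => simp [pvIncs]
  | cons a t ih =>
    rw [pvIncs]
    refine List.Nodup.cons ?_ (ih.map (fun c c' h => by injection h))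
    intro hmem
    obtain ⟨c, -, hc⟩ := List.mem_map.mp hmem
    injection hc with h1 h2
    omega

lemma pvFoldl_enqueue {l : List (List Int)} (hl : l.Nodup) (q : List (List Int)) :
    l.foldl (fun qq s_ => if s_ ∈ qq then qq else qq ++ [s_]) q
      = q ++ l.filter (fun x => decide (x ∉ q)) := by
  induction l generalizing q with
  | nil => simp
  | cons x l ih =>
    have hx_l : x ∉ l := (List.nodup_cons.mp hl).1
    have hl' : l.Nodup := (List.nodup_cons.mp hl).2
    rw [List.foldl_cons]
    by_cases hx : x ∈ q
    · rw [if_pos hx, ih hl' q, List.filter_cons]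
      simp [hx]
    · rw [if_neg hx, ih hl' (q ++ [x]), List.filter_cons]
      simp only [hx, not_false_eq_true, decide_true, if_pos]
      rw [List.filter_congr (l := l) (q := fun y => decide (y ∉ q))
        (fun y hy => by
          have : y ≠ x := fun h => hx_l (h ▸ hy)
          simp [List.mem_append, this])]
      simp

lemma pvFilter_sublist {l s : List (List Int)} (hl : l.Nodup) (hs : s.Sublist l) :
    l.filter (fun x => decide (x ∈ s)) = s := by
  induction hs with
  | slnil => simp
  | @cons s' l' a hs ih =>
    have hnd := List.nodup_cons.mp hl
    rw [List.filter_cons]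
    have ha : a ∉ s' := fun h => hnd.1 (hs.subset h)
    simp only [ha, decide_false, Bool.false_eq_true, if_false]
    exact ih hnd.2
  | @cons₂ s' l' a hs ih =>
    have hnd := List.nodup_cons.mp hl
    rw [List.filter_cons]
    simp only [List.mem_cons, true_or, decide_true, if_true]
    rw [List.filter_congr (l := l') (q := fun y => decide (y ∈ s'))
      (fun y hy => by
        have : y ≠ a := fun h => hnd.1 (h ▸ hy)
        simp [this]),
      ih hnd.2]

-- expected dict entry of a state
def pvEntry (classes : List String) (L : Int) (s : List Int) : List (String × List Int) :=
  if s.sum < L then classes.zip (pvIncs s) else []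

-- number of non-root levels of the enumeration
def pvTop (classes : List String) (L : Int) : Nat := if 0 < classes.length then L.toNat else 0

-- popping p: the states enqueued are exactly its first-discovery children
lemma pvStepFilter {n l : Nat} {P rest : List (List Int)} {p : List Int}
    (hdec : pvCompositions (l : Int) n = P ++ p :: rest) :
    (pvIncs p).filter (fun c => decide (c ∉ rest ++ P.flatMap pvNewKids)) = pvNewKids p := by
  have hpmem : p ∈ pvCompositions (l : Int) n := by rw [hdec]; simp
  obtain ⟨hplen, hpsum, hppos⟩ := mem_pvCompositions.mp hpmem
  have hF : pvCompositions ((l : Int) + 1) n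
      = P.flatMap pvNewKids ++ pvNewKids p ++ rest.flatMap pvNewKids := by
    rw [← pvFlatMap_newKids (l : Int) n (by positivity), hdec]
    simp [List.flatMap_append, List.append_assoc]
  have hnodup1 := pvCompositions_nodup ((l : Int) + 1) n
  rw [hF] at hnodup1
  have hiff : ∀ c ∈ pvIncs p, (c ∉ rest ++ P.flatMap pvNewKids) ↔ c ∈ pvNewKids p := by
    intro c hc
    obtain ⟨hclen, hcsum⟩ := mem_pvIncs_length_sum hc
    constructor
    · intro hno
      by_contra hnk
      obtain ⟨q, hlt, hqlen, hqsum, hqpos, hcq⟩ := pvGT hppos hc hnk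
      have hqmem : q ∈ pvCompositions (l : Int) n :=
        mem_pvCompositions.mpr ⟨hqlen.trans hplen, by rw [hqsum, hpsum], hqpos⟩
      have hsor := pvCompositions_sorted (l : Int) n
      rw [hdec] at hsor hqmem
      rcases List.mem_append.mp hqmem with hqP | hqpr
      · exact hno (List.mem_append.mpr (Or.inr (List.mem_flatMap.mpr ⟨q, hqP, hcq⟩)))
      · rcases List.mem_cons.mp hqpr with rfl | hqrest
        · exact absurd hlt (lt_irrefl q)
        · have hqp : q < p := ((List.pairwise_cons.mp (List.pairwise_append.mp hsor).2.1).1) q hqrest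
          exact absurd hlt (not_lt.mpr hqp.le)
    · intro hnk hin
      rcases List.mem_append.mp hin with hr | hP
      · have : c ∈ pvCompositions (l : Int) n := by rw [hdec]; simp [hr]
        obtain ⟨-, hcs, -⟩ := mem_pvCompositions.mp this
        omega
      · have hnd := List.nodup_append.mp (List.nodup_append.mp hnodup1).1
        exact hnd.2.2 c hP c hnk rfl
  rw [List.filter_congr (fun c hc => decide_eq_decide.mpr (hiff c hc))]
  exact pvFilter_sublist (pvIncs_nodup p) (pvNewKids_sublist p)

-- B's successor comprehension computes pvIncs too
lemma pvBnxt_general (s pre : List Int) :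
    (PySem.List.pyRange (pre.length : Int) ((pre.length : Int) + s.length) 1).map (fun i =>
        PySem.List.slice (pre ++ s) none (some i) ++ [PySem.List.pyGetD (pre ++ s) i 0 + 1] ++
          PySem.List.slice (pre ++ s) (some (i + 1)) none)
      = (pvIncs s).map (pre ++ ·) := by
  induction s generalizing pre with
  | nil => simp [PySem.List.pyRange_one_eq_nil, pvIncs]
  | cons a t ih =>
    rw [PySem.List.pyRange_one_cons (by simp), List.map_cons]
    have h1 : PySem.List.slice (pre ++ a :: t) none (some (pre.length : Int)) = pre := by
      rw [PySem.List.slice_to_natCast]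
      exact List.take_left
    have h2 : PySem.List.slice (pre ++ a :: t) (some ((pre.length : Int) + 1)) none = t := by
      have : ((pre.length : Int) + 1) = ((pre.length + 1 : Nat) : Int) := by push_cast; ring
      rw [this, PySem.List.slice_from_natCast]
      have : pre ++ a :: t = (pre ++ [a]) ++ t := by simp
      rw [this]
      have : pre.length + 1 = (pre ++ [a]).length := by simp
      rw [this, List.drop_left]
    have h3 : PySem.List.pyGetD (pre ++ a :: t) (pre.length : Int) 0 = a := by
      rw [PySem.List.pyGetD_natCast]
      simp [List.getD_eq_getElem?_getD]
    have h4 : PySem.List.pyRange ((pre.length : Int) + 1) ((pre.length : Int) + (a :: t).length) 1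
        = PySem.List.pyRange (((pre ++ [a]).length : Nat) : Int)
            ((((pre ++ [a]).length : Nat) : Int) + t.length) 1 := by
      congr 1 <;> simp <;> push_cast <;> ring
    have h5 := ih (pre ++ [a])
    have h6 : (pre ++ [a]) ++ t = pre ++ a :: t := by simp
    rw [h6] at h5
    rw [h1, h2, h3, h4, h5]
    simp [pvIncs, List.map_map, Function.comp_def]

lemma pvBnxt (s : List Int) :
    (PySem.List.pyRange 0 (s.length : Int) 1).map (fun i =>
        PySem.List.slice s none (some i) ++ [PySem.List.pyGetD s i 0 + 1] ++
          PySem.List.slice s (some (i + 1)) none)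
      = pvIncs s := by
  have h := pvBnxt_general s []
  simpa using h

-- the BFS loop of A processes the combinatorial enumeration level by level
lemma pvMain (classes : List String) (L : Int) :
    ∀ (m l : Nat) (P rest : List (List Int)) (d : PySem.Dict (List Int) (List (String × List Int))),
      l + m = pvTop classes L →
      pvCompositions (l : Int) classes.length = P ++ rest →
      pvLoop classes L (rest ++ (if m = 0 then [] else P.flatMap pvNewKids)) d
        = (rest ++ ((List.range m).map
              (fun (j : Nat) => pvCompositions ((l : Int) + 1 + (j : Int)) classes.length)).flatten).foldl
            (fun d s => d.insert s (pvEntry classes L s)) d := by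
  intro m
  induction m with
  | zero =>
    intro l P rest d htop hdec
    rw [if_pos rfl, List.append_nil]
    simp only [List.range_zero, List.map_nil, List.flatten_nil, List.append_nil]
    induction rest generalizing P d with
    | nil => simp [pvLoop]
    | cons p rest ihr =>
      have hpmem : p ∈ pvCompositions (l : Int) classes.length := by rw [hdec]; simp
      obtain ⟨hplen, hpsum, hppos⟩ := mem_pvCompositions.mp hpmem
      have hnext : (if p.sum < L then generate_next_pwd_states p else []) = [] := by
        rcases Nat.eq_zero_or_pos classes.length with hn | hn
        · have hpnil : p = [] := List.length_eq_zero_iff.mp (by omega)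
          subst hpnil
          rw [gnps_eq_pvIncs, pvIncs, ite_self]
        · have : pvTop classes L = L.toNat := by rw [pvTop, if_pos hn]
          have hge : ¬ p.sum < L := by rw [hpsum]; omega
          rw [if_neg hge]
      have hentry : pvEntry classes L p = [] := by
        rcases Nat.eq_zero_or_pos classes.length with hn | hn
        · have hcnil : classes = [] := List.length_eq_zero_iff.mp (by omega)
          subst hcnil
          rw [pvEntry]
          split <;> simp
        · have : pvTop classes L = L.toNat := by rw [pvTop, if_pos hn]
          have hge : ¬ p.sum < L := by rw [hpsum]; omega
          rw [pvEntry, if_neg hge]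
      rw [pvLoop]
      simp only [hnext, List.foldl_nil, List.zip_nil_right, List.foldl_cons, hentry]
      exact ihr (P ++ [p]) (d.insert p []) (by rw [hdec]; simp)
  | succ m' ihm =>
    intro l P rest d htop hdec
    rw [if_neg (Nat.succ_ne_zero m')]
    induction rest generalizing P d with
    | nil =>
      rw [List.append_nil] at hdec
      rw [List.nil_append, List.nil_append]
      have hflat : P.flatMap pvNewKids = pvCompositions ((l : Int) + 1) classes.length := by
        rw [← hdec]
        exact pvFlatMap_newKids (l : Int) classes.length (by positivity)
      have h := ihm (l + 1) [] (pvCompositions ((l : Int) + 1) classes.length) d (by omega)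
        (by push_cast; simp)
      have hz : (if m' = 0 then [] else List.flatMap pvNewKids ([] : List (List Int))) = [] := by
        split <;> simp
      rw [hz, List.append_nil] at h
      rw [hflat, h, List.range_succ_eq_map, List.map_cons, List.flatten_cons, List.map_map]
      have hfun : ((fun (j : Nat) => pvCompositions ((l : Int) + 1 + (j : Int)) classes.length)
            ∘ Nat.succ)
          = (fun (j : Nat) => pvCompositions ((((l + 1 : Nat) : Int)) + 1 + (j : Int))
              classes.length) := by
        funext j
        simp only [Function.comp_apply]
        congr 1
        push_cast
        ring
      rw [hfun]
      have hcast : ((l : Int) + 1 + ((0 : Nat) : Int)) = (((l + 1 : Nat) : Int)) := by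
        push_cast; ring
      rw [hcast]
      push_cast
      rfl
    | cons p rest ihr =>
      have hpmem : p ∈ pvCompositions (l : Int) classes.length := by rw [hdec]; simp
      obtain ⟨hplen, hpsum, hppos⟩ := mem_pvCompositions.mp hpmem
      have hn : 0 < classes.length := by
        by_contra hn
        have : pvTop classes L = 0 := by rw [pvTop, if_neg hn]
        omega
      have htopL : pvTop classes L = L.toNat := by rw [pvTop, if_pos hn]
      have hlt : p.sum < L := by rw [hpsum]; omega
      rw [List.cons_append, pvLoop]
      simp only [if_pos hlt, gnps_eq_pvIncs]
      rw [pvFoldl_enqueue (pvIncs_nodup p) (rest ++ P.flatMap pvNewKids), pvStepFilter hdec]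
      have hq : (rest ++ P.flatMap pvNewKids) ++ pvNewKids p
          = rest ++ (P ++ [p]).flatMap pvNewKids := by
        simp [List.flatMap_append, List.append_assoc]
      rw [hq, ihr (P ++ [p]) (d.insert p (classes.zip (pvIncs p))) (by rw [hdec]; simp),
        List.cons_append, List.foldl_cons]
      congr 2
      rw [pvEntry, if_pos hlt]

-- ===== VERDICT (by name: the statement is the Claim_ definition above) =====
theorem generate_state_transitions_spec : Claim_equal_generate_state_transitions := by
  intro classes L hdom
  show generate_state_transitions classes L = generate_state_transitions_alt classes L
  have hz : (if pvTop classes L = 0 then [] else List.flatMap pvNewKids ([] : List (List Int)))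
      = [] := by
    split <;> simp
  have hdec0 : pvCompositions (((0 : Nat) : Int)) classes.length
      = [] ++ [List.replicate classes.length 0] := by
    rw [show (((0 : Nat) : Int)) = (0 : Int) from rfl, pvCompositions_zero]
    rfl
  have hA := pvMain classes L (pvTop classes L) 0 [] [List.replicate classes.length 0]
    PySem.Dict.empty (by omega) hdec0
  rw [hz, List.append_nil] at hA
  have hE : [List.replicate classes.length 0]
        ++ ((List.range (pvTop classes L)).map
            (fun (j : Nat) => pvCompositions ((((0 : Nat) : Int)) + 1 + (j : Int))
              classes.length)).flatten
      = ((List.range (pvTop classes L + 1)).map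
            (fun (k : Nat) => pvCompositions ((k : Int)) classes.length)).flatten := by
    rw [List.range_succ_eq_map, List.map_cons, List.flatten_cons, List.map_map]
    congr 1
    · rw [show (((0 : Nat) : Int)) = (0 : Int) from rfl, pvCompositions_zero]
    · congr 1
      refine List.map_congr_left ?_
      intro j _
      simp only [Function.comp_apply]
      congr 1
      push_cast
      ring
  rw [hE] at hA
  rw [generate_state_transitions, hA]
  have htopI : (if 0 < classes.length then max L 0 else (0 : Int))
      = ((pvTop classes L : Nat) : Int) := by
    rw [pvTop]
    split
    · rw [Int.toNat_eq_max]
    · rfl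
  simp only [generate_state_transitions_alt]
  rw [htopI]
  have hrange : PySem.List.pyRange 0 (((pvTop classes L : Nat) : Int) + 1) 1
      = (List.range (pvTop classes L + 1)).map (fun (k : Nat) => (k : Int)) := by
    rw [show ((pvTop classes L : Nat) : Int) + 1 = (((pvTop classes L + 1 : Nat)) : Int) by
      push_cast; ring]
    exact PySem.List.pyRange_zero_natCast _
  rw [hrange, List.foldl_map, List.foldl_flatten, List.foldl_map]
  congr 1
  refine PySem.List.foldl_congr_mem _ _ _ _ ?_
  intro acc k hk
  refine PySem.List.foldl_congr_mem _ _ _ _ ?_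
  intro st s hs
  obtain ⟨hslen, hssum, -⟩ := mem_pvCompositions.mp hs
  congr 1
  rw [pvEntry, hssum,
    show ((classes.length : Nat) : Int) = ((s.length : Nat) : Int) by rw [hslen],
    pvBnxt s, apply_ite (fun t => classes.zip t), List.zip_nil_right]
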